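-- pv_equiv track=rewrite | github.com/znfgnu/NeuralNetwork | Utils.py | vector_to_matrices
-- ===== SOURCE A (Python) =====
-- def vector_to_matrices(vector, sizes):
--     #print "LOL!", vector
--     matrices = []
--     start = 0
--     for s in sizes:
--         m = vector[start:start+(s[0]*s[1])]
--         start += s[0]*s[1]
--         matrices.append(m)
--     return matrices
-- ===== SOURCE B (Python) =====
-- def vector_to_matrices(vector, sizes):
--     # Two passes: first a table of cumulative boundary offsets, then slices
--     # between consecutive offset pairs.
--     offsets = [0]
--     for s in sizes:
--         offsets.append(offsets[-1] + s[0] * s[1])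
--     return [vector[a:b] for a, b in zip(offsets, offsets[1:])]
-- ===== Notes on version B (the rewrite author's own statement) =====
-- stated objective: alternative
-- what changed: Replaces the single loop threading a running start through appends by two separate passes: build a cumulative offset table, then slice the vector between consecutive offset pairs.
import Mathlib
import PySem

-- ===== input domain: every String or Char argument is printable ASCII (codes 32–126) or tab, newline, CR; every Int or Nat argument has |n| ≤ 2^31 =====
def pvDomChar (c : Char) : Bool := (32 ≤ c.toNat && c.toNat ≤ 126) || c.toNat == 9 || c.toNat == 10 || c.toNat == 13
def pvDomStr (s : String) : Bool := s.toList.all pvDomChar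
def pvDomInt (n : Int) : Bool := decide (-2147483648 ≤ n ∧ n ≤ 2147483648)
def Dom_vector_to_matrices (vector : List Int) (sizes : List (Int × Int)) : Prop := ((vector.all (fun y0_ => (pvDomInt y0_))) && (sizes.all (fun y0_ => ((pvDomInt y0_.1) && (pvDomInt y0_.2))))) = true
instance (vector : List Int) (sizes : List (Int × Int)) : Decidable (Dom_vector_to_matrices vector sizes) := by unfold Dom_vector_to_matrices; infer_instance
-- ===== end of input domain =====

-- B builds a cumulative offset table in one pass, then slices between
-- consecutive offset pairs in a second pass; A threads a running start
-- through one append loop. Same values, different decomposition.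

-- ===== PORT A =====
def vector_to_matrices (vector : List Int) (sizes : List (Int × Int)) : List (List Int) :=
  -- state = (matrices, start), exactly A's loop
  (sizes.foldl
    (fun (acc : List (List Int) × Int) s =>
      let m := PySem.List.slice vector (some acc.2) (some (acc.2 + s.1 * s.2))
      (acc.1 ++ [m], acc.2 + s.1 * s.2))
    ([], 0)).1

-- ===== PORT B =====
def vector_to_matrices_alt (vector : List Int) (sizes : List (Int × Int)) : List (List Int) :=
  -- offsets[-1] on an always-nonempty list: getLast! is exact here
  let offsets := sizes.foldl (fun (os : List Int) s => os ++ [os.getLast! + s.1 * s.2]) [0]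
  (offsets.zip offsets.tail).map (fun p => PySem.List.slice vector (some p.1) (some p.2))

-- ===== PRECONDITION & SPEC =====
def Spec_vector_to_matrices (vector : List Int) (sizes : List (Int × Int)) (out : List (List Int)) : Prop := out = vector_to_matrices_alt vector sizes
instance (vector : List Int) (sizes : List (Int × Int)) (out : List (List Int)) : Decidable (Spec_vector_to_matrices vector sizes out) := by unfold Spec_vector_to_matrices; infer_instance

-- ===== CLAIM (what is proved, stated in full; the proofs are below) =====
def Claim_equal_vector_to_matrices : Prop := ∀ (vector : List Int) (sizes : List (Int × Int)), Dom_vector_to_matrices vector sizes → Spec_vector_to_matrices vector sizes (vector_to_matrices vector sizes)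

-- ===== LEMMAS AND PROOFS =====

-- reference recursion both ports are reduced to
def pvGo (v : List Int) (start : Int) : List (Int × Int) → List (List Int)
  | [] => []
  | s :: rest => PySem.List.slice v (some start) (some (start + s.1 * s.2)) :: pvGo v (start + s.1 * s.2) rest

-- cumulative offsets starting at x
def pvOff (x : Int) : List (Int × Int) → List Int
  | [] => [x]
  | s :: rest => x :: pvOff (x + s.1 * s.2) rest

theorem pvOff_ne_nil (x : Int) (l : List (Int × Int)) : pvOff x l ≠ [] := by
  cases l <;> simp [pvOff]

theorem pvOff_head (x : Int) (l : List (Int × Int)) :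
    (pvOff x l).head (pvOff_ne_nil x l) = x := by
  cases l <;> simp [pvOff]

theorem foldA_eq (v : List Int) (l : List (Int × Int)) (acc : List (List Int)) (start : Int) :
    (l.foldl
      (fun (acc : List (List Int) × Int) s =>
        let m := PySem.List.slice v (some acc.2) (some (acc.2 + s.1 * s.2))
        (acc.1 ++ [m], acc.2 + s.1 * s.2))
      (acc, start)).1 = acc ++ pvGo v start l := by
  induction l generalizing acc start with
  | nil => simp [pvGo]
  | cons s rest ih => simp [pvGo, ih]

theorem foldB_eq (l : List (Int × Int)) (pre : List Int) (last : Int) :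
    l.foldl (fun (os : List Int) s => os ++ [os.getLast! + s.1 * s.2]) (pre ++ [last])
      = pre ++ pvOff last l := by
  induction l generalizing pre last with
  | nil => simp [pvOff]
  | cons s rest ih =>
    have h : (pre ++ [last]).getLast! = last := by
      induction pre with
      | nil => rfl
      | cons a t iht => cases t <;> simp_all [List.getLast!]
    simp only [List.foldl_cons, h]
    rw [List.append_assoc]
    simpa [pvOff] using ih (pre ++ [last]) (last + s.1 * s.2)

theorem zip_off_eq (v : List Int) (start : Int) (l : List (Int × Int)) :
    ((pvOff start l).zip (pvOff start l).tail).map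
      (fun p => PySem.List.slice v (some p.1) (some p.2)) = pvGo v start l := by
  induction l generalizing start with
  | nil => simp [pvOff, pvGo]
  | cons s rest ih =>
    obtain ⟨y, t, hyt⟩ : ∃ y t, pvOff (start + s.1 * s.2) rest = y :: t := by
      cases h : pvOff (start + s.1 * s.2) rest with
      | nil => exact absurd h (pvOff_ne_nil _ _)
      | cons y t => exact ⟨y, t, rfl⟩
    have hy : y = start + s.1 * s.2 := by
      have := pvOff_head (start + s.1 * s.2) rest
      simpa [hyt] using this
    subst hy
    have h1 : pvOff start (s :: rest) = start :: (start + s.1 * s.2) :: t := by simp [pvOff, hyt]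
    have h2 := ih (start + s.1 * s.2)
    rw [hyt] at h2
    simp only [List.tail_cons] at h2
    simp only [h1, List.tail_cons, List.zip_cons_cons, List.map_cons, pvGo, h2]

-- ===== VERDICT (by name: the statement is the Claim_ definition above) =====
theorem vector_to_matrices_spec : Claim_equal_vector_to_matrices := by
  intro vector sizes _
  show vector_to_matrices vector sizes = vector_to_matrices_alt vector sizes
  unfold vector_to_matrices vector_to_matrices_alt
  rw [foldA_eq]
  have : sizes.foldl (fun (os : List Int) s => os ++ [os.getLast! + s.1 * s.2]) [0]
      = pvOff 0 sizes := by simpa using foldB_eq sizes [] 0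
  simp only [this, zip_off_eq, List.nil_append]
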